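-- pv_equiv track=rewrite | github.com/TianLangHin/Y2023_AdventOfCode | src/14/day14.py | key_to_grid
-- ===== SOURCE A (Python) =====
-- def key_to_grid(key: int, total_length: int) -> list[int]:
--     grid = []
--     while key != 0:
--         grid.append(key & 3)
--         key >>= 2
--     for _ in range(total_length - len(grid)):
--         grid.append(0)
--     return grid
-- ===== SOURCE B (Python) =====
-- def key_to_grid(key: int, total_length: int) -> list[int]:
--     length = max(total_length, (key.bit_length() + 1) // 2)
--     return [(key >> (2 * i)) & 3 for i in range(length)]
-- ===== Notes on version B (the rewrite author's own statement) =====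
-- stated objective: simpler
-- what changed: Replaces the destructive divide-loop plus separate padding loop by computing the digit count from key.bit_length() and building the whole list in one comprehension indexed by digit position.
-- outside the precondition, e.g. on key_to_grid(-1, 3): A does not finish within the time limit, B returns [3, 3, 3]
import Mathlib
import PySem

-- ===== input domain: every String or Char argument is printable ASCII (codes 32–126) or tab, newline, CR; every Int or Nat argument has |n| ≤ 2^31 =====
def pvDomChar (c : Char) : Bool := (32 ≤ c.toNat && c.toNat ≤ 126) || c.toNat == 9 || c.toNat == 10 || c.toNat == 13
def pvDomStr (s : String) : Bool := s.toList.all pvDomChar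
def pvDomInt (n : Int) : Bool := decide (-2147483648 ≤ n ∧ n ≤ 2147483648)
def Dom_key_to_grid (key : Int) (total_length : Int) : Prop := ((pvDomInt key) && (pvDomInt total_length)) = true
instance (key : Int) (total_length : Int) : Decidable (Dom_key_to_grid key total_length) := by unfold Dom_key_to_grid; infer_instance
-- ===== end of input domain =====

-- B replaces A's destructive divide-loop plus a separate padding loop by computing the
-- digit count from bit_length and building the list in one pass indexed by digit position
-- (simpler); Pre_ excludes key < 0, on which A loops forever.


-- ===== PORT A =====
-- the 'while key != 0' loop; on Pre_ (key ≥ 0) key is carried as a Nat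
def keyLoopA (k : Nat) (grid : List Int) : List Int :=
  if k = 0 then grid
  else keyLoopA (k >>> 2) (grid ++ [((k &&& 3 : Nat) : Int)])
termination_by k
decreasing_by simp [Nat.shiftRight_eq_div_pow]; omega

def key_to_grid (key : Int) (total_length : Int) : List Int :=
  let grid := keyLoopA key.toNat []
  grid ++ List.replicate (total_length - (grid.length : Int)).toNat 0

-- ===== PORT B =====
def key_to_grid_alt (key : Int) (total_length : Int) : List Int :=
  let length := max total_length (((PySem.Int.bitLength key + 1) / 2 : Nat) : Int)
  (List.range length.toNat).map (fun (i : Nat) => PySem.Int.band (key >>> (2 * i)) 3)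

-- ===== PRECONDITION & SPEC =====
-- A never terminates when key < 0 (key >>= 2 converges to -1, never 0)
def Pre_key_to_grid (key : Int) (total_length : Int) : Prop := 0 ≤ key
instance (key : Int) (total_length : Int) : Decidable (Pre_key_to_grid key total_length) := by unfold Pre_key_to_grid; infer_instance
def pvWitness_key_to_grid : Int × Int := (37, 5)

def Spec_key_to_grid (key : Int) (total_length : Int) (out : List Int) : Prop := out = key_to_grid_alt key total_length
instance (key : Int) (total_length : Int) (out : List Int) : Decidable (Spec_key_to_grid key total_length out) := by unfold Spec_key_to_grid; infer_instance

-- ===== CLAIM (what is proved, stated in full; the proofs are below) =====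
def Claim_equal_key_to_grid : Prop := ∀ (key : Int) (total_length : Int), Dom_key_to_grid key total_length → Pre_key_to_grid key total_length → Spec_key_to_grid key total_length (key_to_grid key total_length)

-- ===== LEMMAS AND PROOFS =====

-- bit length of a Nat, and the number of base-4 digits of k (0 for k = 0)
def pyBitLength (n : Nat) : Nat := if n = 0 then 0 else Nat.log2 n + 1

def dig4 (k : Nat) : Nat := (pyBitLength k + 1) / 2

lemma pyBitLength_half (m : Nat) (h : 0 < m) : pyBitLength m = pyBitLength (m / 2) + 1 := by
  rcases Nat.lt_or_ge m 2 with h2 | h2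
  · interval_cases m <;> decide
  · have hm2 : 1 ≤ m / 2 := by omega
    have hlog : 1 ≤ Nat.log2 m := by
      rw [Nat.log2_eq_log_two]
      exact (Nat.le_log_iff_pow_le (by norm_num) (by omega)).mpr (by simpa using h2)
    simp only [pyBitLength, Nat.ne_of_gt h, Nat.ne_of_gt hm2, if_false]
    simp only [Nat.log2_eq_log_two] at hlog ⊢
    rw [Nat.log_div_base]
    omega

lemma bitLength_eq (m : Nat) : PySem.Int.bitLength (m : Int) = pyBitLength m := by
  induction m using Nat.strong_induction_on with
  | _ m ih =>
    by_cases h : m = 0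
    · simp [h, pyBitLength]
    · rw [PySem.Int.bitLength_natCast (by omega), ih (m / 2) (by omega),
        pyBitLength_half m (by omega)]

lemma log2_div4 (k : Nat) (_h : 4 ≤ k) : Nat.log2 (k / 4) = Nat.log2 k - 2 := by
  have : k / 4 = k / 2 / 2 := by omega
  rw [this, Nat.log2_eq_log_two, Nat.log2_eq_log_two, Nat.log_div_base, Nat.log_div_base]
  omega

lemma dig4_step (k : Nat) (h : k ≠ 0) : dig4 k = dig4 (k >>> 2) + 1 := by
  have hs : k >>> 2 = k / 4 := by simp [Nat.shiftRight_eq_div_pow]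
  by_cases h4 : 4 ≤ k
  · have hlog : 2 ≤ Nat.log2 k := by
      rw [Nat.log2_eq_log_two]
      exact (Nat.le_log_iff_pow_le (by norm_num) (by omega)).mpr (by simpa using h4)
    have hne : k / 4 ≠ 0 := by omega
    simp [dig4, pyBitLength, h, hs, hne, log2_div4 k h4]
    omega
  · have h1 : 1 ≤ k := by omega
    have h3 : k ≤ 3 := by omega
    interval_cases k <;> decide

lemma lt_two_pow_bitLength (k : Nat) : k < 2 ^ pyBitLength k := by
  by_cases h : k = 0
  · simp [h, pyBitLength]
  · simp only [pyBitLength, h, if_false]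
    exact Nat.lt_log2_self

lemma digit_zero_of_ge (k i : Nat) (h : dig4 k ≤ i) : (k >>> (2 * i)) &&& 3 = 0 := by
  have hk : k < 2 ^ (2 * i) := by
    calc k < 2 ^ pyBitLength k := lt_two_pow_bitLength k
    _ ≤ 2 ^ (2 * i) := by
      apply Nat.pow_le_pow_right (by norm_num)
      have : pyBitLength k ≤ 2 * dig4 k := by unfold dig4; omega
      omega
  have : k >>> (2 * i) = 0 := by
    simp [Nat.shiftRight_eq_div_pow]
    omega
  simp [this]

lemma keyLoopA_acc (k : Nat) (acc : List Int) : keyLoopA k acc = acc ++ keyLoopA k [] := by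
  induction k using Nat.strong_induction_on generalizing acc with
  | _ k ih =>
    by_cases h : k = 0
    · simp [keyLoopA, h]
    · have hlt : k >>> 2 < k := by simp [Nat.shiftRight_eq_div_pow]; omega
      rw [keyLoopA]
      simp only [h, if_false]
      conv_rhs => rw [keyLoopA]
      simp only [h, if_false]
      rw [ih _ hlt (acc ++ [((k &&& 3 : Nat) : Int)]), ih _ hlt ([] ++ [((k &&& 3 : Nat) : Int)])]
      simp

lemma keyLoopA_eq (k : Nat) :
    keyLoopA k [] = (List.range (dig4 k)).map (fun i => (((k >>> (2 * i)) &&& 3 : Nat) : Int)) := by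
  induction k using Nat.strong_induction_on with
  | _ k ih =>
    by_cases h : k = 0
    · simp [keyLoopA, h, dig4, pyBitLength]
    · have hlt : k >>> 2 < k := by simp [Nat.shiftRight_eq_div_pow]; omega
      rw [keyLoopA]
      simp only [h, if_false]
      rw [keyLoopA_acc, ih _ hlt, dig4_step k h, List.range_succ_eq_map]
      simp only [List.map_cons, List.map_map]
      refine congrArg₂ List.cons (by norm_num) ?_
      refine List.map_congr_left ?_
      intro i hi
      have hsh : k >>> 2 >>> (2 * i) = k >>> (2 * (i + 1)) := by
        rw [show (2 * (i + 1)) = 2 + 2 * i from by omega, ← Nat.shiftRight_add]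
      simp [Function.comp, hsh, Nat.succ_eq_add_one]

lemma range_pad (k d p : Nat) (hd : d = dig4 k) :
    (List.range (d + p)).map (fun i => (((k >>> (2 * i)) &&& 3 : Nat) : Int)) =
    (List.range d).map (fun i => (((k >>> (2 * i)) &&& 3 : Nat) : Int)) ++ List.replicate p 0 := by
  rw [List.range_add, List.map_append, List.map_map]
  congr 1
  apply List.eq_replicate_iff.mpr
  constructor
  · simp
  · intro b hb
    simp only [List.mem_map, List.mem_range] at hb
    obtain ⟨i, _, hbe⟩ := hb
    have : (k >>> (2 * (d + i))) &&& 3 = 0 := by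
      apply digit_zero_of_ge; omega
    simpa [Function.comp, this] using hbe.symm

-- ===== VERDICT (by name: the statement is the Claim_ definition above) =====
theorem key_to_grid_spec : Claim_equal_key_to_grid := by
  intro key total_length _ hpre
  unfold Spec_key_to_grid key_to_grid key_to_grid_alt
  have hcast : key = ((key.toNat : Nat) : Int) := by
    unfold Pre_key_to_grid at hpre; omega
  rw [hcast]
  simp only [keyLoopA_eq, Int.toNat_natCast]
  set k := key.toNat with hk
  set d := dig4 k with hd
  have hdig : ∀ i : Nat, PySem.Int.band (((k : Nat) : Int) >>> (2 * i)) 3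
      = (((k >>> (2 * i)) &&& 3 : Nat) : Int) := by
    intro i
    have hsh : (((k : Nat) : Int) >>> (2 * i)) = (((k >>> (2 * i) : Nat)) : Int) := by
      exact_mod_cast rfl
    rw [hsh]
    exact PySem.Int.band_natCast _ 3
  simp only [hdig]
  have hlen : ((List.range d).map (fun i => (((k >>> (2 * i)) &&& 3 : Nat) : Int))).length = d := by
    simp
  rw [hlen, bitLength_eq]
  have hmax : (max total_length ((((pyBitLength k + 1) / 2 : Nat)) : Int)).toNat
      = d + (total_length - (d : Int)).toNat := by
    have : ((pyBitLength k + 1) / 2 : Nat) = d := rfl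
    rw [this]; omega
  rw [hmax, range_pad k d _ hd]
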